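-- pv_equiv track=rewrite | github.com/Tanmay853/classroom-occupancy-dashboard | onlinedata.py | count_people_in_manual_zones
-- ===== SOURCE A (Python) =====
-- def count_people_in_manual_zones(points, zones):
--     counts = [0] * len(zones)
--     for x, y in points:
--         for i, (x1, y1, x2, y2) in enumerate(zones):
--             if x1 <= x <= x2 and y1 <= y <= y2:
--                 counts[i] += 1
--                 break
--     return counts
-- ===== SOURCE B (Python) =====
-- def count_people_in_manual_zones(points, zones):
--     claimed = [False for _ in points]
--     counts = []
--     for (x1, y1, x2, y2) in zones:
--         n = 0
--         for j, (x, y) in enumerate(points):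
--             if not claimed[j] and x1 <= x <= x2 and y1 <= y <= y2:
--                 n += 1
--                 claimed[j] = True
--         counts.append(n)
--     return counts
-- ===== Notes on version B (the rewrite author's own statement) =====
-- stated objective: alternative
-- what changed: B traverses zone-major instead of point-major: a per-point claimed mask replaces the inner enumerate+break, so each zone counts the still-unclaimed points it contains.
import Mathlib
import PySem

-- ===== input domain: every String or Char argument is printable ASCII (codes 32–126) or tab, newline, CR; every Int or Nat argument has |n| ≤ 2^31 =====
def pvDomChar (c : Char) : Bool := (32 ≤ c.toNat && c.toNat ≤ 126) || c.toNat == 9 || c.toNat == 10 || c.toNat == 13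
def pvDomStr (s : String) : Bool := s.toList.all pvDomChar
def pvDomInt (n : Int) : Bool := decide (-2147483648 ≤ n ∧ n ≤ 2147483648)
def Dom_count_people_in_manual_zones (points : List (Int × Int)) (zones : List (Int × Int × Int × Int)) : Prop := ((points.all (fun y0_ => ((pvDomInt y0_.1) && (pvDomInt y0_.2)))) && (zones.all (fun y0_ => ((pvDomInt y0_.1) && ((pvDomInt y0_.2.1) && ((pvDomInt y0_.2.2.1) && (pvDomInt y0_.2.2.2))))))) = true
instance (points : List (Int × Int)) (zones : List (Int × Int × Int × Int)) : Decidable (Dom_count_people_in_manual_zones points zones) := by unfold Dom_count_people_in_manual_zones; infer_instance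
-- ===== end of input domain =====

-- B replaces A's point-major loop with inner break by a zone-major loop over a per-point
-- claimed mask (alternative decomposition, same cost).

-- ===== PORT A =====
-- inner 'for i, (x1,y1,x2,y2) in enumerate(zones): if … : counts[i] += 1; break'
-- = index of the first zone containing (x, y), if any
def firstHitA (x y : Int) : List (Int × Int × Int × Int) → Nat → Option Nat
  | [], _ => none
  | (x1, y1, x2, y2) :: rest, i =>
    if x1 ≤ x ∧ x ≤ x2 ∧ y1 ≤ y ∧ y ≤ y2 then some i else firstHitA x y rest (i + 1)

def count_people_in_manual_zones (points : List (Int × Int)) (zones : List (Int × Int × Int × Int)) : List Int :=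
  points.foldl
    (fun counts p =>
      match firstHitA p.1 p.2 zones 0 with
      | some i => counts.modify i (· + 1)
      | none => counts)
    (List.replicate zones.length 0)

-- ===== PORT B =====
-- inner 'for j, (x, y) in enumerate(points): if not claimed[j] and …'; the state is the
-- points list zipped with its claimed mask; returns (count for this zone, updated state)
def scanZoneB (x1 y1 x2 y2 : Int) : List ((Int × Int) × Bool) → Int × List ((Int × Int) × Bool)
  | [] => (0, [])
  | (p, c) :: rest =>
    let r := scanZoneB x1 y1 x2 y2 rest
    if c = false ∧ x1 ≤ p.1 ∧ p.1 ≤ x2 ∧ y1 ≤ p.2 ∧ p.2 ≤ y2 then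
      (r.1 + 1, (p, true) :: r.2)
    else
      (r.1, (p, c) :: r.2)

-- outer 'for i, (x1,y1,x2,y2) in enumerate(zones)': emits counts[i] zone by zone
def zoneLoopB : List (Int × Int × Int × Int) → List ((Int × Int) × Bool) → List Int
  | [], _ => []
  | (x1, y1, x2, y2) :: zs, L =>
    let r := scanZoneB x1 y1 x2 y2 L
    r.1 :: zoneLoopB zs r.2

def count_people_in_manual_zones_alt (points : List (Int × Int)) (zones : List (Int × Int × Int × Int)) : List Int :=
  zoneLoopB zones (points.map (fun p => (p, false)))

-- ===== PRECONDITION & SPEC =====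
def Spec_count_people_in_manual_zones (points : List (Int × Int)) (zones : List (Int × Int × Int × Int)) (out : List Int) : Prop := out = count_people_in_manual_zones_alt points zones
instance (points : List (Int × Int)) (zones : List (Int × Int × Int × Int)) (out : List Int) : Decidable (Spec_count_people_in_manual_zones points zones out) := by unfold Spec_count_people_in_manual_zones; infer_instance

-- ===== CLAIM (what is proved, stated in full; the proofs are below) =====
def Claim_equal_count_people_in_manual_zones : Prop := ∀ (points : List (Int × Int)) (zones : List (Int × Int × Int × Int)), Dom_count_people_in_manual_zones points zones → Spec_count_people_in_manual_zones points zones (count_people_in_manual_zones points zones)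

-- ===== LEMMAS AND PROOFS =====

-- membership test of a point in a zone, as both ports decide it
def insideZ (z : Int × Int × Int × Int) (p : Int × Int) : Bool :=
  decide (z.1 ≤ p.1 ∧ p.1 ≤ z.2.2.1 ∧ z.2.1 ≤ p.2 ∧ p.2 ≤ z.2.2.2)

-- common reference: count per zone of the points it is the first container of
def specRec : List (Int × Int) → List (Int × Int × Int × Int) → List Int
  | _, [] => []
  | pts, z :: zs =>
    ((pts.filter (insideZ z)).length : Int) :: specRec (pts.filter (fun p => !insideZ z p)) zs

theorem specRec_length (pts : List (Int × Int)) (zs : List (Int × Int × Int × Int)) :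
    (specRec pts zs).length = zs.length := by
  induction zs generalizing pts with
  | nil => simp [specRec]
  | cons z zs ih => simp [specRec, ih]

theorem specRec_nil (zs : List (Int × Int × Int × Int)) :
    specRec [] zs = List.replicate zs.length 0 := by
  induction zs with
  | nil => simp [specRec]
  | cons z zs ih => simp [specRec, ih, List.replicate_succ]

theorem firstHitA_shift (x y : Int) (zs : List (Int × Int × Int × Int)) (n : Nat) :
    firstHitA x y zs n = (firstHitA x y zs 0).map (· + n) := by
  induction zs generalizing n with
  | nil => simp [firstHitA]
  | cons z zs ih =>
    obtain ⟨x1, y1, x2, y2⟩ := z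
    by_cases h : x1 ≤ x ∧ x ≤ x2 ∧ y1 ≤ y ∧ y ≤ y2
    · simp [firstHitA, h]
    · simp only [firstHitA, if_neg h]
      rw [ih (n + 1), ih 1]
      cases firstHitA x y zs 0
      · simp
      · simp; omega

theorem specRec_cons (p : (Int × Int)) (pts : List (Int × Int)) (zs : List (Int × Int × Int × Int)) :
    specRec (p :: pts) zs =
      match firstHitA p.1 p.2 zs 0 with
      | some i => (specRec pts zs).modify i (· + 1)
      | none => specRec pts zs := by
  induction zs generalizing pts with
  | nil => simp [specRec, firstHitA]
  | cons z zs ih =>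
    obtain ⟨x1, y1, x2, y2⟩ := z
    by_cases h : x1 ≤ p.1 ∧ p.1 ≤ x2 ∧ y1 ≤ p.2 ∧ p.2 ≤ y2
    · have hins : insideZ (x1, y1, x2, y2) p = true := by
        simp only [insideZ]; exact decide_eq_true h
      have hf1 : (p :: pts).filter (insideZ (x1, y1, x2, y2))
          = p :: pts.filter (insideZ (x1, y1, x2, y2)) :=
        List.filter_cons_of_pos hins
      have hf2 : (p :: pts).filter (fun q => !insideZ (x1, y1, x2, y2) q)
          = pts.filter (fun q => !insideZ (x1, y1, x2, y2) q) :=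
        List.filter_cons_of_neg (by simp [hins])
      simp only [specRec, firstHitA, if_pos h, hf1, hf2, List.length_cons]
      simp
    · have hins : insideZ (x1, y1, x2, y2) p = false := by
        simp only [insideZ]; exact decide_eq_false h
      have hf1 : (p :: pts).filter (insideZ (x1, y1, x2, y2))
          = pts.filter (insideZ (x1, y1, x2, y2)) :=
        List.filter_cons_of_neg (by simp [hins])
      have hf2 : (p :: pts).filter (fun q => !insideZ (x1, y1, x2, y2) q)
          = p :: pts.filter (fun q => !insideZ (x1, y1, x2, y2) q) :=
        List.filter_cons_of_pos (by simp [hins])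
      simp only [specRec, firstHitA, if_neg h, hf1, hf2]
      rw [firstHitA_shift p.1 p.2 zs 1, ih]
      cases firstHitA p.1 p.2 zs 0
      · simp
      · simp

theorem zipWith_add_modify (c v : List Int) (i : Nat) :
    List.zipWith (· + ·) (c.modify i (· + 1)) v =
      List.zipWith (· + ·) c (v.modify i (· + 1)) := by
  induction c generalizing v i with
  | nil => simp
  | cons a c ih =>
    cases v with
    | nil => simp
    | cons b v =>
      cases i with
      | zero => simp; ring
      | succ i => simpa using ih v i

theorem zipWith_add_replicate_right (c : List Int) (n : Nat) (h : c.length ≤ n) :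
    List.zipWith (· + ·) c (List.replicate n (0 : Int)) = c := by
  induction c generalizing n with
  | nil => simp
  | cons a c ih =>
    cases n with
    | zero => simp at h
    | succ n =>
      simp only [List.replicate_succ, List.zipWith_cons_cons, add_zero]
      rw [ih n (by simpa using h)]

theorem zipWith_add_replicate_left (v : List Int) (n : Nat) (h : v.length ≤ n) :
    List.zipWith (· + ·) (List.replicate n (0 : Int)) v = v := by
  induction v generalizing n with
  | nil => simp
  | cons a v ih =>
    cases n with
    | zero => simp at h
    | succ n =>
      simp only [List.replicate_succ, List.zipWith_cons_cons, zero_add]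
      rw [ih n (by simpa using h)]

theorem foldlA_eq (zones : List (Int × Int × Int × Int)) (pts : List (Int × Int))
    (c : List Int) (hc : c.length = zones.length) :
    pts.foldl
      (fun counts p =>
        match firstHitA p.1 p.2 zones 0 with
        | some i => counts.modify i (· + 1)
        | none => counts) c
      = List.zipWith (· + ·) c (specRec pts zones) := by
  induction pts generalizing c with
  | nil =>
    rw [specRec_nil, List.foldl_nil, ← hc, zipWith_add_replicate_right c c.length le_rfl]
  | cons p pts ih =>
    rw [List.foldl_cons, specRec_cons]
    cases hfh : firstHitA p.1 p.2 zones 0 with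
    | none => exact ih c hc
    | some i =>
      rw [ih (c.modify i (· + 1)) (by simpa using hc), zipWith_add_modify]

-- the points carried by the still-unclaimed entries of B's state
def unclaimedPts (L : List ((Int × Int) × Bool)) : List (Int × Int) :=
  (L.filter (fun pc => !pc.2)).map Prod.fst

theorem unclaimedPts_cons_true (p : Int × Int) (L : List ((Int × Int) × Bool)) :
    unclaimedPts ((p, true) :: L) = unclaimedPts L := by
  simp [unclaimedPts]

theorem unclaimedPts_cons_false (p : Int × Int) (L : List ((Int × Int) × Bool)) :
    unclaimedPts ((p, false) :: L) = p :: unclaimedPts L := by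
  simp [unclaimedPts]

theorem scanZoneB_cons (x1 y1 x2 y2 : Int) (p : Int × Int) (c : Bool)
    (rest : List ((Int × Int) × Bool)) :
    scanZoneB x1 y1 x2 y2 ((p, c) :: rest) =
      if c = false ∧ x1 ≤ p.1 ∧ p.1 ≤ x2 ∧ y1 ≤ p.2 ∧ p.2 ≤ y2 then
        ((scanZoneB x1 y1 x2 y2 rest).1 + 1, (p, true) :: (scanZoneB x1 y1 x2 y2 rest).2)
      else
        ((scanZoneB x1 y1 x2 y2 rest).1, (p, c) :: (scanZoneB x1 y1 x2 y2 rest).2) := rfl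

theorem scanZoneB_fst (x1 y1 x2 y2 : Int) (L : List ((Int × Int) × Bool)) :
    (scanZoneB x1 y1 x2 y2 L).1 =
      (((unclaimedPts L).filter (insideZ (x1, y1, x2, y2))).length : Int) := by
  induction L with
  | nil => simp [scanZoneB, unclaimedPts]
  | cons pc L ih =>
    obtain ⟨p, c⟩ := pc
    cases c with
    | true =>
      rw [scanZoneB_cons, if_neg (by simp), unclaimedPts_cons_true]
      exact ih
    | false =>
      by_cases h4 : x1 ≤ p.1 ∧ p.1 ≤ x2 ∧ y1 ≤ p.2 ∧ p.2 ≤ y2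
      · have hins : insideZ (x1, y1, x2, y2) p = true := by
          simp only [insideZ]; exact decide_eq_true h4
        rw [scanZoneB_cons, if_pos ⟨rfl, h4⟩, unclaimedPts_cons_false]
        rw [List.filter_cons_of_pos hins, List.length_cons]
        simp [ih]
      · have hins : insideZ (x1, y1, x2, y2) p = false := by
          simp only [insideZ]; exact decide_eq_false h4
        rw [scanZoneB_cons, if_neg (by simp [h4]), unclaimedPts_cons_false]
        rw [List.filter_cons_of_neg (by simp [hins])]
        exact ih

theorem scanZoneB_snd (x1 y1 x2 y2 : Int) (L : List ((Int × Int) × Bool)) :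
    unclaimedPts (scanZoneB x1 y1 x2 y2 L).2 =
      (unclaimedPts L).filter (fun p => !insideZ (x1, y1, x2, y2) p) := by
  induction L with
  | nil => simp [scanZoneB, unclaimedPts]
  | cons pc L ih =>
    obtain ⟨p, c⟩ := pc
    cases c with
    | true =>
      rw [scanZoneB_cons, if_neg (by simp), unclaimedPts_cons_true, unclaimedPts_cons_true]
      exact ih
    | false =>
      by_cases h4 : x1 ≤ p.1 ∧ p.1 ≤ x2 ∧ y1 ≤ p.2 ∧ p.2 ≤ y2
      · have hins : insideZ (x1, y1, x2, y2) p = true := by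
          simp only [insideZ]; exact decide_eq_true h4
        rw [scanZoneB_cons, if_pos ⟨rfl, h4⟩, unclaimedPts_cons_false, unclaimedPts_cons_true]
        rw [List.filter_cons_of_neg (by simp [hins])]
        exact ih
      · have hins : insideZ (x1, y1, x2, y2) p = false := by
          simp only [insideZ]; exact decide_eq_false h4
        rw [scanZoneB_cons, if_neg (by simp [h4]), unclaimedPts_cons_false,
          unclaimedPts_cons_false, List.filter_cons_of_pos (by simp [hins]), ih]

theorem zoneLoopB_eq (zs : List (Int × Int × Int × Int)) (L : List ((Int × Int) × Bool)) :
    zoneLoopB zs L = specRec (unclaimedPts L) zs := by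
  induction zs generalizing L with
  | nil => simp [zoneLoopB, specRec]
  | cons z zs ih =>
    obtain ⟨x1, y1, x2, y2⟩ := z
    simp only [zoneLoopB, specRec]
    rw [scanZoneB_fst, ih, scanZoneB_snd]

theorem unclaimedPts_init (points : List (Int × Int)) :
    unclaimedPts (points.map (fun p => (p, false))) = points := by
  induction points with
  | nil => simp [unclaimedPts]
  | cons p pts ih => rw [List.map_cons, unclaimedPts_cons_false, ih]

-- ===== VERDICT (by name: the statement is the Claim_ definition above) =====
theorem count_people_in_manual_zones_spec : Claim_equal_count_people_in_manual_zones := by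
  intro points zones _
  unfold Spec_count_people_in_manual_zones
  unfold count_people_in_manual_zones count_people_in_manual_zones_alt
  rw [foldlA_eq zones points _ (by simp), zoneLoopB_eq, unclaimedPts_init,
    zipWith_add_replicate_left _ _ (by rw [specRec_length])]
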